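-- pv_equiv track=rewrite | github.com/footballqq/fungame | tools/chesshorse_knight_tour_solver.py | is_valid_knight_tour_path
-- ===== SOURCE A (Python) =====
-- from typing import Iterable, List, Optional
--
-- KNIGHT_DELTAS = (
--     (1, 2),
--     (2, 1),
--     (-1, 2),
--     (-2, 1),
--     (1, -2),
--     (2, -1),
--     (-1, -2),
--     (-2, -1),
-- )
--
-- def build_knight_adjacency(board_size: int) -> List[List[int]]:
--     """build_knight_adjacency: 预计算每个格子的可达邻接表，加速求解。"""
--     if board_size <= 0:
--         raise ValueError("board_size must be positive")
--
--     cell_count = board_size * board_size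
--     adjacency_by_cell_index: List[List[int]] = [[] for _ in range(cell_count)]
--     for cell_index in range(cell_count):
--         row_index = cell_index // board_size
--         col_index = cell_index % board_size
--         for dr, dc in KNIGHT_DELTAS:
--             next_row_index = row_index + dr
--             next_col_index = col_index + dc
--             if (
--                 next_row_index < 0
--                 or next_row_index >= board_size
--                 or next_col_index < 0
--                 or next_col_index >= board_size
--             ):
--                 continue
--             adjacency_by_cell_index[cell_index].append(
--                 next_row_index * board_size + next_col_index
--             )
--     return adjacency_by_cell_index
--
-- def is_valid_knight_tour_path(board_size: int, path_cell_indices: Iterable[int]) -> bool: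
--     """is_valid_knight_tour_path: 校验路径是否合法（覆盖全盘/无重复/每步为马走法）。"""
--     path_list = list(path_cell_indices)
--     cell_count = board_size * board_size
--     if len(path_list) != cell_count:
--         return False
--
--     if any((not isinstance(v, int)) for v in path_list):
--         return False
--     if any((v < 0 or v >= cell_count) for v in path_list):
--         return False
--     if len(set(path_list)) != cell_count:
--         return False
--
--     adjacency_by_cell_index = build_knight_adjacency(board_size)
--     for i in range(1, len(path_list)):
--         prev_cell_index = path_list[i - 1]
--         next_cell_index = path_list[i]
--         if next_cell_index not in adjacency_by_cell_index[prev_cell_index]: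
--             return False
--
--     return True
-- ===== SOURCE B (Python) =====
-- def is_valid_knight_tour_path(board_size, path_cell_indices):
--     """Validate a knight tour by checking each step's (row, col) deltas arithmetically,
--     without precomputing an adjacency table."""
--     path = list(path_cell_indices)
--     n = board_size * board_size
--     if len(path) != n:
--         return False
--     if any(not isinstance(v, int) for v in path):
--         return False
--     if any(v < 0 or v >= n for v in path):
--         return False
--     if len(set(path)) != n:
--         return False
--     if board_size <= 0:
--         raise ValueError("board_size must be positive")
--     return all(
--         {abs(b // board_size - a // board_size),
--          abs(b % board_size - a % board_size)} == {1, 2}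
--         for a, b in zip(path, path[1:]))
-- ===== Notes on version B (the rewrite author's own statement) =====
-- stated objective: simpler
-- what changed: B drops the precomputed per-cell adjacency table and the membership scan: each consecutive step is accepted directly when the absolute row/col deltas (idx//size, idx%size) form the set {1,2}; like A it raises ValueError for board_size<=0 once the guards pass, and Pre_ excludes exactly that raising region.
import Mathlib
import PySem

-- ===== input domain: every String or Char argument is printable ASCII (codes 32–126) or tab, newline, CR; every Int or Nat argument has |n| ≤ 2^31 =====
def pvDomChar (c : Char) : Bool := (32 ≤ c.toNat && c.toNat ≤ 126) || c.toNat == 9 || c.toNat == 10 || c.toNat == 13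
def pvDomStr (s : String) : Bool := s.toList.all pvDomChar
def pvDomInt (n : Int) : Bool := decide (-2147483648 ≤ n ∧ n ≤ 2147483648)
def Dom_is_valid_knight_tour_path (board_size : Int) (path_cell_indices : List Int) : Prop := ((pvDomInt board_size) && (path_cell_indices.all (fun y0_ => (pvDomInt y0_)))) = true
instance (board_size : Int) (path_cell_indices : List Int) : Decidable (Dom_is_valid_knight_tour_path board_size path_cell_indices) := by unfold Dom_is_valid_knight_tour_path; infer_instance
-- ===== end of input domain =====

-- B replaces A's precomputed adjacency table + membership scan by a direct arithmetic
-- check of the absolute row/col deltas of each step (objective: simpler).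

-- ===== PORT A =====
def KNIGHT_DELTAS : List (Int × Int) :=
  [(1, 2), (2, 1), (-1, 2), (-2, 1), (1, -2), (2, -1), (-1, -2), (-2, -1)]

-- build_knight_adjacency: 'none' is exactly Python's ValueError for board_size <= 0.
-- The per-cell inner loop appends reachable neighbours in KNIGHT_DELTAS order.
def build_knight_adjacency (board_size : Int) : Option (List (List Int)) :=
  if board_size ≤ 0 then none
  else
    let cell_count := board_size * board_size
    some ((PySem.List.pyRange 0 cell_count 1).map (fun cell_index =>
      let row_index := PySem.Int.floordiv cell_index board_size
      let col_index := PySem.Int.mod cell_index board_size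
      KNIGHT_DELTAS.foldl (fun acc d =>
        let next_row_index := row_index + d.1
        let next_col_index := col_index + d.2
        if next_row_index < 0 || next_row_index ≥ board_size ||
           next_col_index < 0 || next_col_index ≥ board_size then acc
        else acc ++ [next_row_index * board_size + next_col_index]) []))

def is_valid_knight_tour_path (board_size : Int) (path_cell_indices : List Int) : Bool :=
  let path_list := path_cell_indices
  let cell_count := board_size * board_size
  if (path_list.length : Int) ≠ cell_count then false
  -- A's isinstance check can never fire on List Int; omitted
  else if path_list.any (fun v => v < 0 || v ≥ cell_count) then false
  else if ((PySem.Set.ofList path_list).length : Int) ≠ cell_count then false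
  else
    match build_knight_adjacency board_size with
    | none => false   -- ValueError path; excluded by Pre_
    | some adjacency_by_cell_index =>
      (PySem.List.pyRange 1 (path_list.length : Int) 1).all (fun i =>
        let prev_cell_index := PySem.List.pyGetD path_list (i - 1) 0
        let next_cell_index := PySem.List.pyGetD path_list i 0
        (PySem.List.pyGetD adjacency_by_cell_index prev_cell_index []).contains next_cell_index)

-- ===== PORT B =====
def is_valid_knight_tour_path_alt (board_size : Int) (path_cell_indices : List Int) : Bool :=
  let path := path_cell_indices
  let n := board_size * board_size
  if (path.length : Int) ≠ n then false
  else if path.any (fun v => v < 0 || v ≥ n) then false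
  else if ((PySem.Set.ofList path).length : Int) ≠ n then false
  else if board_size ≤ 0 then false   -- B raises ValueError here, like A; excluded by Pre_
  else
    (path.zip path.tail).all (fun ab =>
      -- {abs(b//s - a//s), abs(b%s - a%s)} == {1, 2}
      let dr := (PySem.Int.floordiv ab.2 board_size - PySem.Int.floordiv ab.1 board_size).natAbs
      let dc := (PySem.Int.mod ab.2 board_size - PySem.Int.mod ab.1 board_size).natAbs
      (dr == 1 && dc == 2) || (dr == 2 && dc == 1))

-- ===== PRECONDITION & SPEC =====
-- Pre_ excludes exactly the inputs on which both A and B raise ValueError: board_size <= 0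
-- while the path passes all of the length/range/distinctness guards.
def Pre_is_valid_knight_tour_path (board_size : Int) (path_cell_indices : List Int) : Prop :=
  ¬ (board_size ≤ 0 ∧ (path_cell_indices.length : Int) = board_size * board_size ∧
     (∀ v ∈ path_cell_indices, 0 ≤ v ∧ v < board_size * board_size) ∧
     path_cell_indices.Nodup)
instance (board_size : Int) (path_cell_indices : List Int) : Decidable (Pre_is_valid_knight_tour_path board_size path_cell_indices) := by unfold Pre_is_valid_knight_tour_path; infer_instance

def pvWitness_is_valid_knight_tour_path : Int × List Int := (1, [0])

def Spec_is_valid_knight_tour_path (board_size : Int) (path_cell_indices : List Int) (out : Bool) : Prop := out = is_valid_knight_tour_path_alt board_size path_cell_indices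
instance (board_size : Int) (path_cell_indices : List Int) (out : Bool) : Decidable (Spec_is_valid_knight_tour_path board_size path_cell_indices out) := by unfold Spec_is_valid_knight_tour_path; infer_instance

-- ===== CLAIM (what is proved, stated in full; the proofs are below) =====
def Claim_equal_is_valid_knight_tour_path : Prop := ∀ (board_size : Int) (path_cell_indices : List Int), Dom_is_valid_knight_tour_path board_size path_cell_indices → Pre_is_valid_knight_tour_path board_size path_cell_indices → Spec_is_valid_knight_tour_path board_size path_cell_indices (is_valid_knight_tour_path board_size path_cell_indices)

-- ===== LEMMAS AND PROOFS =====

lemma cell_unique (bs r1 c1 r2 c2 : Int) (hbs : 0 < bs)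
    (h1 : 0 ≤ c1) (h2 : c1 < bs) (h3 : 0 ≤ c2) (h4 : c2 < bs)
    (h : r1 * bs + c1 = r2 * bs + c2) : r1 = r2 ∧ c1 = c2 := by
  have hr : r1 = r2 := by
    rcases lt_trichotomy r1 r2 with hlt | heq | hgt
    · nlinarith
    · exact heq
    · nlinarith
  exact ⟨hr, by subst hr; linarith⟩


lemma adjRow_eq (bs r1 c1 : Int) :
    KNIGHT_DELTAS.foldl (fun acc d =>
        let nr := r1 + d.1
        let nc := c1 + d.2
        if nr < 0 || nr ≥ bs || nc < 0 || nc ≥ bs then acc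
        else acc ++ [nr * bs + nc]) []
    = (KNIGHT_DELTAS.filter (fun d =>
        !(decide (r1 + d.1 < 0) || decide (r1 + d.1 ≥ bs) ||
          decide (c1 + d.2 < 0) || decide (c1 + d.2 ≥ bs)))).map
        (fun d => (r1 + d.1) * bs + (c1 + d.2)) := by
  have hfun : (fun (acc : List Int) (d : Int × Int) =>
      let nr := r1 + d.1; let nc := c1 + d.2;
      if nr < 0 || nr ≥ bs || nc < 0 || nc ≥ bs then acc
      else acc ++ [nr * bs + nc])
    = (fun acc d =>
        if (fun (d : Int × Int) =>
              !(decide (r1 + d.1 < 0) || decide (r1 + d.1 ≥ bs) ||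
                decide (c1 + d.2 < 0) || decide (c1 + d.2 ≥ bs))) d = true
        then acc ++ [(fun (d : Int × Int) => (r1 + d.1) * bs + (c1 + d.2)) d] else acc) := by
    funext acc d
    by_cases h : (decide (r1 + d.1 < 0) || decide (r1 + d.1 ≥ bs) ||
        decide (c1 + d.2 < 0) || decide (c1 + d.2 ≥ bs)) = true <;> simp [h]
  rw [hfun, PySem.List.foldl_append_if, List.nil_append]


lemma step_equiv (bs p q : Int) (hbs : 0 < bs)
    (hp0 : 0 ≤ p) (hp1 : p < bs * bs) (hq0 : 0 ≤ q) (hq1 : q < bs * bs) :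
    ((KNIGHT_DELTAS.foldl (fun acc d =>
        let nr := PySem.Int.floordiv p bs + d.1
        let nc := PySem.Int.mod p bs + d.2
        if nr < 0 || nr ≥ bs || nc < 0 || nc ≥ bs then acc
        else acc ++ [nr * bs + nc]) []).contains q)
    = (((PySem.Int.floordiv q bs - PySem.Int.floordiv p bs).natAbs == 1 &&
        (PySem.Int.mod q bs - PySem.Int.mod p bs).natAbs == 2) ||
       ((PySem.Int.floordiv q bs - PySem.Int.floordiv p bs).natAbs == 2 &&
        (PySem.Int.mod q bs - PySem.Int.mod p bs).natAbs == 1)) := by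
  set r1 := PySem.Int.floordiv p bs with hr1def
  set c1 := PySem.Int.mod p bs with hc1def
  set r2 := PySem.Int.floordiv q bs with hr2def
  set c2 := PySem.Int.mod q bs with hc2def
  have hc1 : 0 ≤ c1 ∧ c1 < bs := ⟨PySem.Int.mod_nonneg p hbs, PySem.Int.mod_lt p hbs⟩
  have hc2 : 0 ≤ c2 ∧ c2 < bs := ⟨PySem.Int.mod_nonneg q hbs, PySem.Int.mod_lt q hbs⟩
  have hpeq : r1 * bs + c1 = p := PySem.Int.floordiv_mul_add_mod p bs
  have hqeq : r2 * bs + c2 = q := PySem.Int.floordiv_mul_add_mod q bs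
  have hr1b : 0 ≤ r1 ∧ r1 < bs := by constructor <;> nlinarith
  have hr2b : 0 ≤ r2 ∧ r2 < bs := by constructor <;> nlinarith
  clear_value r1 c1 r2 c2
  rw [Bool.eq_iff_iff, adjRow_eq]
  simp only [List.contains_eq_mem, decide_eq_true_eq, List.mem_map,
    List.mem_filter, KNIGHT_DELTAS, List.mem_cons, List.not_mem_nil, or_false,
    Bool.not_eq_eq_eq_not, Bool.not_true, Bool.or_eq_false_iff, decide_eq_false_iff_not,
    not_lt, not_le, Bool.or_eq_true, Bool.and_eq_true, beq_iff_eq]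
  constructor
  · rintro ⟨d, ⟨hd, hok⟩, heq⟩
    obtain ⟨he1, he2⟩ := cell_unique bs (r1 + d.1) (c1 + d.2) r2 c2 hbs (by omega) (by omega)
      hc2.1 hc2.2 (heq.trans hqeq.symm)
    rcases hd with h | h | h | h | h | h | h | h <;> subst h <;> dsimp only at he1 he2 <;> omega
  · intro h
    rcases h with ⟨h1, h2⟩ | ⟨h1, h2⟩
    · have hr : r2 = r1 + 1 ∨ r2 = r1 - 1 := by omega
      have hc : c2 = c1 + 2 ∨ c2 = c1 - 2 := by omega
      rcases hr with e1 | e1 <;> rcases hc with e2 | e2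
      · exact ⟨(1, 2), ⟨by norm_num [KNIGHT_DELTAS], by dsimp only; omega⟩, by dsimp only; subst e1; subst e2; linear_combination hqeq⟩
      · exact ⟨(1, -2), ⟨by norm_num [KNIGHT_DELTAS], by dsimp only; omega⟩, by dsimp only; subst e1; subst e2; linear_combination hqeq⟩
      · exact ⟨(-1, 2), ⟨by norm_num [KNIGHT_DELTAS], by dsimp only; omega⟩, by dsimp only; subst e1; subst e2; linear_combination hqeq⟩
      · exact ⟨(-1, -2), ⟨by norm_num [KNIGHT_DELTAS], by dsimp only; omega⟩, by dsimp only; subst e1; subst e2; linear_combination hqeq⟩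
    · have hr : r2 = r1 + 2 ∨ r2 = r1 - 2 := by omega
      have hc : c2 = c1 + 1 ∨ c2 = c1 - 1 := by omega
      rcases hr with e1 | e1 <;> rcases hc with e2 | e2
      · exact ⟨(2, 1), ⟨by norm_num [KNIGHT_DELTAS], by dsimp only; omega⟩, by dsimp only; subst e1; subst e2; linear_combination hqeq⟩
      · exact ⟨(2, -1), ⟨by norm_num [KNIGHT_DELTAS], by dsimp only; omega⟩, by dsimp only; subst e1; subst e2; linear_combination hqeq⟩
      · exact ⟨(-2, 1), ⟨by norm_num [KNIGHT_DELTAS], by dsimp only; omega⟩, by dsimp only; subst e1; subst e2; linear_combination hqeq⟩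
      · exact ⟨(-2, -1), ⟨by norm_num [KNIGHT_DELTAS], by dsimp only; omega⟩, by dsimp only; subst e1; subst e2; linear_combination hqeq⟩

lemma ofList_sublist_aux {α : Type} [BEq α] : ∀ (xs s : List α), (xs.foldl PySem.Set.add s).Sublist (s ++ xs)
  | [], s => by simp
  | x :: xs, s => by
    simp only [List.foldl_cons]
    refine (ofList_sublist_aux xs (PySem.Set.add s x)).trans ?_
    unfold PySem.Set.add
    split_ifs with h
    · exact (List.append_sublist_append_left s).mpr (List.sublist_cons_self x xs)
    · simp

lemma nodup_of_ofList_length (xs : List Int) (h : (PySem.Set.ofList xs).length = xs.length) : xs.Nodup := by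
  have hs : (PySem.Set.ofList xs).Sublist xs := by
    have := ofList_sublist_aux xs ([] : List Int)
    simpa [PySem.Set.ofList_eq_foldl] using this
  have := hs.eq_of_length h
  rw [← this]
  exact PySem.Set.nodup_ofList xs

lemma zip_tail_all (g : Int → Int → Bool) : ∀ (xs : List Int),
    (xs.zip xs.tail).all (fun ab => g ab.1 ab.2)
    = (List.range (xs.length - 1)).all (fun k => g (xs.getD k 0) (xs.getD (k+1) 0))
  | [] => by simp
  | [x] => by simp
  | x :: y :: ys => by
    have ih := zip_tail_all g (y :: ys)
    simp only [List.zip_cons_cons, List.tail_cons, List.all_cons] at ih ⊢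
    rw [show (x :: y :: ys).length - 1 = ((y :: ys).length - 1) + 1 by simp,
        List.range_succ_eq_map, List.all_cons, List.all_map]
    simp only [List.getD_cons_zero, List.getD_cons_succ]
    rw [ih]
    rfl

lemma pyrange_all (g : Int → Int → Bool) (xs : List Int) :
    ((PySem.List.pyRange 1 (xs.length : Int) 1).all fun i =>
      g (PySem.List.pyGetD xs (i - 1) 0) (PySem.List.pyGetD xs i 0))
    = (List.range (xs.length - 1)).all (fun k => g (xs.getD k 0) (xs.getD (k+1) 0)) := by
  rw [PySem.List.pyRange_one, List.all_map]
  have hlen : ((xs.length : Int) - 1).toNat = xs.length - 1 := by omega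
  rw [hlen]
  have hfun : (fun (k : Nat) => (fun i => g (PySem.List.pyGetD xs (i - 1) 0) (PySem.List.pyGetD xs i 0)) (1 + (k : Int)))
      = (fun (k : Nat) => g (xs.getD k 0) (xs.getD (k+1) 0)) := by
    funext k
    have e1 : (1 : Int) + (k : Int) - 1 = (k : Int) := by omega
    have e2 : (1 : Int) + (k : Int) = ((k + 1 : Nat) : Int) := by omega
    dsimp only
    rw [e1, e2]
    simp only [PySem.List.pyGetD_natCast]
  exact congrArg _ hfun

lemma loop_equiv (g : Int → Int → Bool) (xs : List Int) :
    ((PySem.List.pyRange 1 (xs.length : Int) 1).all fun i =>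
      g (PySem.List.pyGetD xs (i - 1) 0) (PySem.List.pyGetD xs i 0))
    = (xs.zip xs.tail).all (fun ab => g ab.1 ab.2) := by
  rw [pyrange_all, zip_tail_all]


def adjRowFun (bs cell : Int) : List Int :=
  KNIGHT_DELTAS.foldl (fun acc d =>
    let next_row_index := PySem.Int.floordiv cell bs + d.1
    let next_col_index := PySem.Int.mod cell bs + d.2
    if next_row_index < 0 || next_row_index ≥ bs ||
       next_col_index < 0 || next_col_index ≥ bs then acc
    else acc ++ [next_row_index * bs + next_col_index]) []

lemma build_eq (bs : Int) (h : 0 < bs) :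
    build_knight_adjacency bs
    = some ((PySem.List.pyRange 0 (bs * bs) 1).map (adjRowFun bs)) := by
  unfold build_knight_adjacency adjRowFun
  rw [if_neg (by omega)]

-- ===== VERDICT =====
theorem is_valid_knight_tour_path_spec : Claim_equal_is_valid_knight_tour_path := by
  intro bs path hdom hpre
  unfold Spec_is_valid_knight_tour_path
  unfold is_valid_knight_tour_path is_valid_knight_tour_path_alt
  dsimp only
  split_ifs with hL hR hS hB
  · rfl
  · rfl
  · rfl
  case pos =>
    push_neg at hL hS
    have hrange : ∀ v ∈ path, 0 ≤ v ∧ v < bs * bs := by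
      intro v hv
      rw [List.any_eq_true] at hR
      push_neg at hR
      have := hR v hv
      simp only [ne_eq, Bool.or_eq_true, decide_eq_true_eq, not_or, not_lt, not_le] at this
      exact this
    have hnodup : path.Nodup := by
      apply nodup_of_ofList_length
      exact_mod_cast hS.trans hL.symm
    exact absurd hB (by intro h; exact hpre ⟨h, hL, hrange, hnodup⟩)
  push_neg at hL hS
  have hrange : ∀ v ∈ path, 0 ≤ v ∧ v < bs * bs := by
    intro v hv
    have h := hR
    rw [List.any_eq_true] at h
    push_neg at h
    have := h v hv
    simp only [ne_eq, Bool.or_eq_true, decide_eq_true_eq, not_or, not_lt, not_le] at this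
    exact this
  have hnodup : path.Nodup := by
    apply nodup_of_ofList_length
    exact_mod_cast hS.trans hL.symm
  have hbs : 0 < bs := by omega
  rw [build_eq bs hbs]
  dsimp only
  rw [loop_equiv (fun a b =>
    (PySem.List.pyGetD ((PySem.List.pyRange 0 (bs * bs) 1).map (adjRowFun bs)) a []).contains b) path]
  rw [Bool.eq_iff_iff]
  simp only [List.all_eq_true]
  have key : ∀ ab ∈ path.zip path.tail,
      ((PySem.List.pyGetD ((PySem.List.pyRange 0 (bs * bs) 1).map (adjRowFun bs)) ab.1 []).contains ab.2)
      = (((PySem.Int.floordiv ab.2 bs - PySem.Int.floordiv ab.1 bs).natAbs == 1 &&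
          (PySem.Int.mod ab.2 bs - PySem.Int.mod ab.1 bs).natAbs == 2) ||
         ((PySem.Int.floordiv ab.2 bs - PySem.Int.floordiv ab.1 bs).natAbs == 2 &&
          (PySem.Int.mod ab.2 bs - PySem.Int.mod ab.1 bs).natAbs == 1)) := by
    intro ab hab
    obtain ⟨h1, h2⟩ := List.of_mem_zip hab
    have h2' := List.mem_of_mem_tail h2
    obtain ⟨ha0, ha1⟩ := hrange ab.1 h1
    obtain ⟨hb0, hb1⟩ := hrange ab.2 h2'
    rw [PySem.List.pyGetD_map_pyRange_of_nonneg _ _ _ _ ha0 ha1]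
    unfold adjRowFun
    exact step_equiv bs ab.1 ab.2 hbs ha0 ha1 hb0 hb1
  constructor <;> intro H ab hab
  · rw [← key ab hab]; exact H ab hab
  · rw [key ab hab]; exact H ab hab
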